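-- pv_equiv track=rewrite | github.com/simonholliday/subsequence | subsequence/voicings.py | invert_chord
-- ===== SOURCE A (Python) =====
-- import typing
--
-- def invert_chord (intervals: typing.List[int], inversion: int) -> typing.List[int]:
--
-- 	"""Rotate chord intervals to produce an inversion.
--
-- 	Inversion 0 is root position. Inversion 1 raises the bottom note by an
-- 	octave (first inversion). Wraps around for inversions >= the number of
-- 	notes.
--
-- 	Parameters:
-- 		intervals: Chord intervals in semitones from root (e.g., ``[0, 4, 7]``)
-- 		inversion: Which inversion to produce (0 = root position)
--
-- 	Returns:
-- 		New interval list re-zeroed so the caller can add any root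
--
-- 	Example:
-- 		```python
-- 		invert_chord([0, 4, 7], 0)  # [0, 4, 7]  - root position
-- 		invert_chord([0, 4, 7], 1)  # [0, 3, 8]  - first inversion
-- 		invert_chord([0, 4, 7], 2)  # [0, 5, 9]  - second inversion
-- 		```
-- 	"""
--
-- 	n = len(intervals)
--
-- 	if n == 0:
-- 		return []
--
-- 	inversion = inversion % n
--
-- 	if inversion == 0:
-- 		return list(intervals)
--
-- 	rotated = intervals[inversion:] + [i + 12 for i in intervals[:inversion]]
-- 	base = rotated[0]
--
-- 	return [i - base for i in rotated]
-- ===== SOURCE B (Python) =====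
-- def invert_chord(intervals, inversion):
--     n = len(intervals)
--     if n == 0:
--         return []
--     k = inversion % n
--     if k == 0:
--         return list(intervals)
--     # Apply the elementary "first inversion" k times: move the bottom note
--     # to the top, an octave higher; then re-zero to the new bottom note.
--     chord = list(intervals)
--     for _ in range(k):
--         chord.append(chord.pop(0) + 12)
--     root = chord[0]
--     return [note - root for note in chord]
-- ===== Notes on version B (the rewrite author's own statement) =====
-- stated objective: alternative
-- what changed: Instead of A's slice-concatenate-then-rezero construction, B iterates the elementary first-inversion operation k times (pop the bottom note, re-append it an octave up), then re-zeroes to the new bottom note.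
import Mathlib
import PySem

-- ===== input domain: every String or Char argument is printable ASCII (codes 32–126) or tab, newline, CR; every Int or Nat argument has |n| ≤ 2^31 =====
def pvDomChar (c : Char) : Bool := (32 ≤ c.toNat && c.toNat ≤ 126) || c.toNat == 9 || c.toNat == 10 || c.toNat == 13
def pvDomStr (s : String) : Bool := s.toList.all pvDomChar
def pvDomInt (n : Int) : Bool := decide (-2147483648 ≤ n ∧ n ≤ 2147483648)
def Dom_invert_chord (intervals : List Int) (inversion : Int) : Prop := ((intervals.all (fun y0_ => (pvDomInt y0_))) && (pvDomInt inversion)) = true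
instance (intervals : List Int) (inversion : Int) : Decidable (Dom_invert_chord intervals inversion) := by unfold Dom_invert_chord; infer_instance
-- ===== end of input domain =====

-- B replaces A's slice-concatenate-then-rezero construction by iterating the elementary
-- first-inversion step k times (move the bottom note to the top an octave up), then
-- re-zeroing to the new bottom note (objective: alternative algorithm, same result).

-- ===== PORT A =====
def invert_chord (intervals : List Int) (inversion : Int) : List Int :=
  let n : Int := intervals.length
  if n = 0 then []
  else
    let inv := PySem.Int.mod inversion n
    if inv = 0 then intervals
    else
      let rotated := PySem.List.slice intervals (some inv) none
        ++ (PySem.List.slice intervals none (some inv)).map (fun i => i + 12)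
      -- rotated[0]; here rotated is provably nonempty, so the default is never taken
      let base := (PySem.List.pyGet? rotated 0).getD 0
      rotated.map (fun i => i - base)

-- ===== PORT B =====
-- one iteration of the loop body: chord.append(chord.pop(0) + 12)
def pvInvStep (ch : List Int) : List Int :=
  match ch with
  | [] => []        -- never reached: chord stays nonempty (n > 0)
  | h :: t => t ++ [h + 12]

def invert_chord_alt (intervals : List Int) (inversion : Int) : List Int :=
  let n : Int := intervals.length
  if n = 0 then []
  else
    let k := PySem.Int.mod inversion n
    if k = 0 then intervals
    else
      let chord := (PySem.List.pyRange 0 k 1).foldl (fun ch _ => pvInvStep ch) intervals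
      -- chord[0]; here chord is provably nonempty, so the default is never taken
      let root := (PySem.List.pyGet? chord 0).getD 0
      chord.map (fun note => note - root)

-- ===== PRECONDITION & SPEC =====
def Spec_invert_chord (intervals : List Int) (inversion : Int) (out : List Int) : Prop := out = invert_chord_alt intervals inversion
instance (intervals : List Int) (inversion : Int) (out : List Int) : Decidable (Spec_invert_chord intervals inversion out) := by unfold Spec_invert_chord; infer_instance

-- ===== CLAIM (what is proved, stated in full; the proofs are below) =====
def Claim_equal_invert_chord : Prop := ∀ (intervals : List Int) (inversion : Int), Dom_invert_chord intervals inversion → Spec_invert_chord intervals inversion (invert_chord intervals inversion)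

-- ===== LEMMAS AND PROOFS =====

-- K applications of the step, counted by a Nat (proof-side view of B's loop)
def pvStepN : Nat → List Int → List Int
  | 0, xs => xs
  | n+1, xs => pvStepN n (pvInvStep xs)

theorem foldl_eq_stepN {α : Type} (l : List α) (xs : List Int) :
    l.foldl (fun ch _ => pvInvStep ch) xs = pvStepN l.length xs := by
  induction l generalizing xs with
  | nil => rfl
  | cons a l ih => simp [pvStepN, ih]

-- iterating the step K times is a K-rotation with +12 on the wrapped prefix
theorem rotN : ∀ (K : Nat) (xs : List Int), K ≤ xs.length →
    pvStepN K xs = xs.drop K ++ (xs.take K).map (fun i => i + 12) := by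
  intro K
  induction K with
  | zero => intro xs _; simp [pvStepN]
  | succ K ih =>
    intro xs hK
    cases xs with
    | nil => simp at hK
    | cons h t =>
      have hK' : K ≤ t.length := by simpa using hK
      show pvStepN K (t ++ [h + 12]) = _
      rw [ih (t ++ [h + 12]) (by simp; omega)]
      rw [List.drop_append_of_le_length hK', List.take_append_of_le_length hK']
      simp

theorem ports_eq (intervals : List Int) (inversion : Int) :
    invert_chord intervals inversion = invert_chord_alt intervals inversion := by
  by_cases h0 : ((intervals.length : Int)) = 0
  · simp [invert_chord, invert_chord_alt, h0]
  · have hn : 0 < ((intervals.length : Int)) := by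
      have := Int.natCast_nonneg intervals.length; omega
    by_cases hk : PySem.Int.mod inversion ((intervals.length : Int)) = 0
    · simp [invert_chord, invert_chord_alt, hk]
    · set N := intervals.length with hNdef
      set kI := PySem.Int.mod inversion (N : Int) with hkIdef
      have hk0 : 0 ≤ kI := PySem.Int.mod_nonneg _ hn
      have hkN : kI < (N : Int) := PySem.Int.mod_lt _ hn
      set K := kI.toNat with hKdef
      have hKcast : (K : Int) = kI := Int.toNat_of_nonneg hk0
      have hKlt : K < N := by omega
      simp only [invert_chord, invert_chord_alt, ← hNdef, ← hkIdef, h0, hk, if_false]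
      rw [← hKcast]
      -- A's slices become drop/take
      rw [PySem.List.slice_some_none, PySem.List.slice_to (xs := intervals) (b := ((K:Nat):Int)) (Int.natCast_nonneg K),
        PySem.List.clampIdx_natCast, Int.toNat_natCast,
        Nat.min_eq_left hKlt.le]
      -- B's iterated step becomes the same drop/take list
      have hfold : (PySem.List.pyRange 0 ((K:Nat):Int) 1).foldl (fun ch _ => pvInvStep ch) intervals
          = intervals.drop K ++ (intervals.take K).map (fun i => i + 12) := by
        rw [foldl_eq_stepN, PySem.List.length_pyRange_one]
        have : ((((K:Nat):Int)) - 0).toNat = K := by omega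
        rw [this]
        exact rotN K intervals hKlt.le
      rw [hfold]

-- ===== VERDICT (by name: the statement is the Claim_ definition above) =====
theorem invert_chord_spec : Claim_equal_invert_chord := by
  intro intervals inversion _
  unfold Spec_invert_chord
  exact ports_eq intervals inversion
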